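-- pv_equiv track=rewrite | github.com/hummel22/homeassistant_gitops | homeassistant_gitops/rootfs/app/gitops_bridge/gitignore_ops.py | ensure_managed_block
-- ===== SOURCE A (Python) =====
-- MANAGED_START = "# BEGIN GitOps Bridge managed"
--
-- MANAGED_END = "# END GitOps Bridge managed"
--
-- def ensure_managed_block(lines: list[str]) -> tuple[list[str], int, int]:
--     start = None
--     end = None
--     for idx, line in enumerate(lines):
--         if line.strip() == MANAGED_START and start is None:
--             start = idx
--             continue
--         if line.strip() == MANAGED_END and start is not None:
--             end = idx
--             break
--     if start is None or end is None or end < start: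
--         if lines and lines[-1].strip():
--             lines.append("")
--         start = len(lines)
--         lines.append(MANAGED_START)
--         lines.append(MANAGED_END)
--         end = start + 1
--     return lines, start, end
-- ===== SOURCE B (Python) =====
-- MANAGED_START = "# BEGIN GitOps Bridge managed"
--
-- MANAGED_END = "# END GitOps Bridge managed"
--
--
-- def ensure_managed_block(lines: list[str]) -> tuple[list[str], int, int]:
--     stripped = [l.strip() for l in lines]
--     starts = [i for i, s in enumerate(stripped) if s == MANAGED_START]
--     ends = [i for i, s in enumerate(stripped) if s == MANAGED_END]
--     if starts:
--         start = starts[0]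
--         later = [e for e in ends if e > start]
--         if later:
--             return lines, start, later[0]
--     if lines and lines[-1].strip():
--         lines.append("")
--     start = len(lines)
--     lines += [MANAGED_START, MANAGED_END]
--     return lines, start, start + 1
-- ===== Notes on version B (the rewrite author's own statement) =====
-- stated objective: alternative
-- what changed: Instead of A's single stateful early-exit scan (start/end flags, continue/break, dead end<start guard), B strips every line once, builds the complete index lists of ALL start-marker and ALL end-marker occurrences by comprehensions, then selects starts[0] and the first end index greater than it by filtering; the fallback append is unchanged.
import Mathlib
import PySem

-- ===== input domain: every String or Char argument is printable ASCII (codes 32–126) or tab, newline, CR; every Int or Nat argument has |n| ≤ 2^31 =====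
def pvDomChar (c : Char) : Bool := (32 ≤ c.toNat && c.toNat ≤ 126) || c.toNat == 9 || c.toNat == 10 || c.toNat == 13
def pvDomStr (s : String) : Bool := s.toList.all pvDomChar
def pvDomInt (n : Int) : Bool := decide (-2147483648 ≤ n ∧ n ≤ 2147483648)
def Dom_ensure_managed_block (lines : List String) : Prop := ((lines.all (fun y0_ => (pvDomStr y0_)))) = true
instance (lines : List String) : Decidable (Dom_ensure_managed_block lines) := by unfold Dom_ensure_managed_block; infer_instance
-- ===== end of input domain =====

-- B replaces A's single stateful early-exit scan (start/end flags, continue/break) by: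
-- strip all lines once, collect the FULL index lists of all start-marker and all
-- end-marker occurrences, then pick starts[0] and the first end index beyond it by
-- filtering; objective: alternative. Both Pythons mutate `lines` in place identically
-- in the fallback branch; the equivalence proved here is about the return value.

def pvMS : String := "# BEGIN GitOps Bridge managed"
def pvME : String := "# END GitOps Bridge managed"

-- ===== PORT A =====
-- A's for-loop: state = current index (Python enumerate int) and `start`;
-- returns (start?, end?) (`break` = return).
def pvLoopA : List String → Int → Option Int → Option Int × Option Int
  | [], _, start => (start, none)
  | line :: rest, idx, start =>
    if PySem.Str.strip line = pvMS ∧ start = none then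
      pvLoopA rest (idx + 1) (some idx)
    else if PySem.Str.strip line = pvME ∧ start ≠ none then
      (start, some idx)
    else
      pvLoopA rest (idx + 1) start

-- A's fallback branch: pad with "" if the last line is non-blank, then append both markers.
def pvFallbackA (lines : List String) : List String × Int × Int :=
  let lines' := if lines ≠ [] ∧ PySem.Str.strip (lines.getLastD "") ≠ "" then lines ++ [""] else lines
  let start : Int := lines'.length
  let lines'' := (lines' ++ [pvMS]) ++ [pvME]
  (lines'', start, start + 1)

def ensure_managed_block (lines : List String) : List String × Int × Int :=
  match pvLoopA lines 0 none with
  | (some s, some e) => if e < s then pvFallbackA lines else (lines, s, e)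
  | _ => pvFallbackA lines

-- ===== PORT B =====
-- B's fallback (same Python code as A's fallback branch; `lines += [a, b]`).
def pvFallbackB (lines : List String) : List String × Int × Int :=
  let lines' := if lines ≠ [] ∧ PySem.Str.strip (lines.getLastD "") ≠ "" then lines ++ [""] else lines
  let start : Int := lines'.length
  (lines' ++ [pvMS, pvME], start, start + 1)

def ensure_managed_block_alt (lines : List String) : List String × Int × Int :=
  let stripped := lines.map PySem.Str.strip
  let starts := (PySem.List.enumerate stripped 0).filterMap
    (fun p => if p.2 = pvMS then some p.1 else none)
  let ends := (PySem.List.enumerate stripped 0).filterMap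
    (fun p => if p.2 = pvME then some p.1 else none)
  match starts.head? with
  | some start =>
    match (ends.filter (fun e => decide (start < e))).head? with
    | some e => (lines, start, e)
    | none => pvFallbackB lines
  | none => pvFallbackB lines

-- ===== PRECONDITION & SPEC =====
def Spec_ensure_managed_block (lines : List String) (out : List String × Int × Int) : Prop := out = ensure_managed_block_alt lines
instance (lines : List String) (out : List String × Int × Int) : Decidable (Spec_ensure_managed_block lines out) := by unfold Spec_ensure_managed_block; infer_instance

-- ===== CLAIM (what is proved, stated in full; the proofs are below) =====
def Claim_equal_ensure_managed_block : Prop := ∀ (lines : List String), Dom_ensure_managed_block lines → Spec_ensure_managed_block lines (ensure_managed_block lines)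

-- ===== LEMMAS AND PROOFS =====

-- proof-side shapes of B's comprehensions: all start-/end-marker indices from offset i
def pvStarts : List String → Int → List Int
  | [], _ => []
  | line :: rest, i => if PySem.Str.strip line = pvMS then i :: pvStarts rest (i + 1) else pvStarts rest (i + 1)

def pvEnds : List String → Int → List Int
  | [], _ => []
  | line :: rest, i => if PySem.Str.strip line = pvME then i :: pvEnds rest (i + 1) else pvEnds rest (i + 1)

-- proof-side shape of A's scan once `start = s` is fixed: first end-marker index > s
def pvEndAfter : List String → Int → Int → Option Int
  | [], _, _ => none
  | line :: rest, i, s => if PySem.Str.strip line = pvME ∧ s < i then some i else pvEndAfter rest (i + 1) s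

theorem pvMS_ne_pvME : pvMS ≠ pvME := by decide

theorem pvStarts_eq (l : List String) (i : Int) :
    (PySem.List.enumerate (l.map PySem.Str.strip) i).filterMap
      (fun p => if p.2 = pvMS then some p.1 else none) = pvStarts l i := by
  induction l generalizing i with
  | nil => rfl
  | cons line rest ih =>
    simp only [List.map_cons, PySem.List.enumerate_cons, List.filterMap_cons, pvStarts]
    by_cases h : PySem.Str.strip line = pvMS <;> simp [h, ih]

theorem pvEnds_eq (l : List String) (i : Int) :
    (PySem.List.enumerate (l.map PySem.Str.strip) i).filterMap
      (fun p => if p.2 = pvME then some p.1 else none) = pvEnds l i := by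
  induction l generalizing i with
  | nil => rfl
  | cons line rest ih =>
    simp only [List.map_cons, PySem.List.enumerate_cons, List.filterMap_cons, pvEnds]
    by_cases h : PySem.Str.strip line = pvME <;> simp [h, ih]

theorem pvEnds_filter_head (l : List String) (i s : Int) :
    ((pvEnds l i).filter (fun e => decide (s < e))).head? = pvEndAfter l i s := by
  induction l generalizing i with
  | nil => rfl
  | cons line rest ih =>
    rw [pvEnds, pvEndAfter]
    by_cases hme : PySem.Str.strip line = pvME
    · rw [if_pos hme]
      by_cases hlt : s < i
      · rw [if_pos ⟨hme, hlt⟩, List.filter_cons_of_pos (by simpa using hlt)]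
        rfl
      · rw [if_neg (by tauto), List.filter_cons_of_neg (by simpa using hlt)]
        exact ih (i + 1)
    · rw [if_neg hme, if_neg (by tauto)]
      exact ih (i + 1)

theorem pvStarts_head_ge (l : List String) (i s : Int)
    (h : (pvStarts l i).head? = some s) : i ≤ s := by
  induction l generalizing i with
  | nil => simp [pvStarts] at h
  | cons line rest ih =>
    rw [pvStarts] at h
    split at h
    · simp at h; omega
    · have := ih (i + 1) h; omega

theorem pvEndAfter_gt (l : List String) (i s e : Int)
    (h : pvEndAfter l i s = some e) : s < e := by
  induction l generalizing i with
  | nil => simp [pvEndAfter] at h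
  | cons line rest ih =>
    rw [pvEndAfter] at h
    split at h
    · next hc => simp at h; omega
    · exact ih (i + 1) h

theorem pvLoopA_some (l : List String) (i s : Int) (hs : s < i) :
    pvLoopA l i (some s) = (some s, pvEndAfter l i s) := by
  induction l generalizing i with
  | nil => rfl
  | cons line rest ih =>
    rw [pvLoopA, pvEndAfter]
    by_cases hms : PySem.Str.strip line = pvMS
    · have hne : ¬ PySem.Str.strip line = pvME := by rw [hms]; exact pvMS_ne_pvME
      rw [if_neg (by simp), if_neg (by simp [hne]), if_neg (fun h => hne h.1)]
      exact ih (i + 1) (by omega)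
    · rw [if_neg (by simp [hms])]
      by_cases hme : PySem.Str.strip line = pvME
      · rw [if_pos (by simp [hme]), if_pos ⟨hme, hs⟩]
      · rw [if_neg (by simp [hme]), if_neg (fun h => hme h.1)]
        exact ih (i + 1) (by omega)

theorem pvLoopA_none (l : List String) (i : Int) :
    pvLoopA l i none =
      match (pvStarts l i).head? with
      | none => (none, none)
      | some s => (some s, pvEndAfter l i s) := by
  induction l generalizing i with
  | nil => rfl
  | cons line rest ih =>
    rw [pvLoopA, pvStarts]
    by_cases hms : PySem.Str.strip line = pvMS
    · rw [if_pos (by simp [hms]), if_pos hms, pvLoopA_some rest (i + 1) i (by omega)]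
      simp only [List.head?_cons]
      rw [pvEndAfter, if_neg (by intro h; omega)]
    · rw [if_neg (by simp [hms]), if_neg hms]
      by_cases hme : PySem.Str.strip line = pvME
      · rw [if_neg (by simp), ih (i + 1)]
        cases hfs : (pvStarts rest (i + 1)).head? with
        | none => rfl
        | some s =>
          have hge := pvStarts_head_ge rest (i + 1) s hfs
          simp only
          rw [pvEndAfter, if_neg (by intro h; omega)]
      · rw [if_neg (by simp [hme]), ih (i + 1)]
        cases hfs : (pvStarts rest (i + 1)).head? with
        | none => rfl
        | some s =>
          simp only
          rw [pvEndAfter, if_neg (fun h => hme h.1)]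

theorem pvFallback_eq (lines : List String) : pvFallbackA lines = pvFallbackB lines := by
  simp [pvFallbackA, pvFallbackB]

-- ===== VERDICT (by name: the statement is the Claim_ definition above) =====
theorem ensure_managed_block_spec : Claim_equal_ensure_managed_block := by
  intro lines _
  unfold Spec_ensure_managed_block ensure_managed_block ensure_managed_block_alt
  simp only [pvStarts_eq, pvEnds_eq, pvEnds_filter_head]
  rw [pvLoopA_none lines 0]
  cases hfs : (pvStarts lines 0).head? with
  | none => simpa using pvFallback_eq lines
  | some s =>
    simp only
    cases he : pvEndAfter lines 0 s with
    | none => simpa using pvFallback_eq lines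
    | some e =>
      have hgt := pvEndAfter_gt lines 0 s e he
      simp only
      rw [if_neg (by omega)]
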